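-- pv_equiv track=rewrite | github.com/deepomicslab/PALACE | share/palace/scripts/corrected_dup.py | find_sublist_indexes
-- ===== SOURCE A (Python) =====
-- def find_sublist_indexes(A, B):
--     if not A or not B:
--         return -1, -1
--     first_index = -1
--     last_index = -1
--     for i in range(len(B) - len(A) + 1):
--         if B[i:i + len(A)] == A:
--             if first_index == -1:
--                 first_index = i
--             last_index = i
--     return first_index, last_index + len(A)
-- ===== SOURCE B (Python) =====
-- def find_sublist_indexes(A, B):
--     if not A or not B:
--         return -1, -1
--     n, m = len(B), len(A)
--     first = -1
--     for i in range(n - m + 1):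
--         if B[i:i + m] == A:
--             first = i
--             break
--     last = -1
--     for i in range(n - m, -1, -1):
--         if B[i:i + m] == A:
--             last = i
--             break
--     return first, last + m
-- ===== Notes on version B (the rewrite author's own statement) =====
-- stated objective: alternative
-- what changed: A makes one full left-to-right scan maintaining both first and last match; B runs two early-exit scans, forward for the first match and backward for the last, each stopping at the first hit.
import Mathlib
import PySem

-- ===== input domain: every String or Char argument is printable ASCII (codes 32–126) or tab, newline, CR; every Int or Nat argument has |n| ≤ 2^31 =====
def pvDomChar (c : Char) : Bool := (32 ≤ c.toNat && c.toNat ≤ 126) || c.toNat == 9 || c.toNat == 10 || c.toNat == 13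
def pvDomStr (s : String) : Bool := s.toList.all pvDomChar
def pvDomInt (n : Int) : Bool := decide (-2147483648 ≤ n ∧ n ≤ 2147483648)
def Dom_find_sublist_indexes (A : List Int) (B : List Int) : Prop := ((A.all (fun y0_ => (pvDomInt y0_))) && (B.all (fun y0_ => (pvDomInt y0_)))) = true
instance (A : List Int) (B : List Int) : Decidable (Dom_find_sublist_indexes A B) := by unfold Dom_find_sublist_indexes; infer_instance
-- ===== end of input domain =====

-- B replaces A's single full scan (maintaining first and last match) by two early-exit
-- scans — forward for the first match, backward for the last (objective: alternative).
-- The Python tuple result (first, last+len(A)) is represented as the 2-element list [first, last+len(A)].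

-- ===== PORT A =====
def find_sublist_indexes (A : List Int) (B : List Int) : List Int :=
  if A = [] ∨ B = [] then [-1, -1]
  else
    let st := (PySem.List.pyRange 0 ((B.length : Int) - (A.length : Int) + 1) 1).foldl
      (fun (st : Int × Int) i =>
        if PySem.List.slice B (some i) (some (i + (A.length : Int))) = A then
          (if st.1 = -1 then i else st.1, i)
        else st)
      (-1, -1)
    [st.1, st.2 + (A.length : Int)]

-- ===== PORT B =====
-- forward scan with break: checks positions i, i+1, … (k candidates), returns the first match or -1
def scanFwdB (A B : List Int) : Nat → Nat → Int
  | _, 0 => -1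
  | i, k+1 =>
    if PySem.List.slice B (some (i : Int)) (some ((i : Int) + (A.length : Int))) = A then (i : Int)
    else scanFwdB A B (i+1) k

-- backward scan with break: checks positions i, i-1, …, 0, returns the first (= rightmost) match or -1
def scanBwdB (A B : List Int) : Nat → Int
  | 0 =>
    if PySem.List.slice B (some (0 : Int)) (some ((0 : Int) + (A.length : Int))) = A then 0 else -1
  | i+1 =>
    if PySem.List.slice B (some ((i : Int) + 1)) (some ((i : Int) + 1 + (A.length : Int))) = A then (i : Int) + 1
    else scanBwdB A B i

def find_sublist_indexes_alt (A : List Int) (B : List Int) : List Int :=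
  if A = [] ∨ B = [] then [-1, -1]
  else if B.length < A.length then
    -- both of Source B's loop ranges are empty here: first = last = -1
    [-1, -1 + (A.length : Int)]
  else
    [scanFwdB A B 0 (B.length - A.length + 1),
     scanBwdB A B (B.length - A.length) + (A.length : Int)]

-- ===== PRECONDITION & SPEC =====
def Spec_find_sublist_indexes (A : List Int) (B : List Int) (out : List Int) : Prop := out = find_sublist_indexes_alt A B
instance (A : List Int) (B : List Int) (out : List Int) : Decidable (Spec_find_sublist_indexes A B out) := by unfold Spec_find_sublist_indexes; infer_instance

-- ===== CLAIM (what is proved, stated in full; the proofs are below) =====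
def Claim_equal_find_sublist_indexes : Prop := ∀ (A : List Int) (B : List Int), Dom_find_sublist_indexes A B → Spec_find_sublist_indexes A B (find_sublist_indexes A B)

-- ===== LEMMAS AND PROOFS =====

-- the last-match value Source B's backward loop computes for the first k candidate positions 0..k-1
def gB (A B : List Int) : Nat → Int
  | 0 => -1
  | k+1 => scanBwdB A B k

-- recurrence of the forward scan when one more candidate is appended on the RIGHT
theorem scanFwdB_succ (A B : List Int) (i k : Nat) :
    scanFwdB A B i (k+1) =
      if scanFwdB A B i k = -1 then
        (if PySem.List.slice B (some ((i+k : Nat) : Int)) (some (((i+k : Nat) : Int) + (A.length : Int))) = A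
         then ((i+k : Nat) : Int) else -1)
      else scanFwdB A B i k := by
  induction k generalizing i with
  | zero => simp [scanFwdB]
  | succ k ih =>
    by_cases h : PySem.List.slice B (some (i : Int)) (some ((i : Int) + (A.length : Int))) = A
    · have hne : (i : Int) ≠ -1 := by omega
      simp [scanFwdB, h, hne]
    · have h1 : scanFwdB A B i (k+1+1) = scanFwdB A B (i+1) (k+1) := by
        simp [scanFwdB, h]
      have h2 : scanFwdB A B i (k+1) = scanFwdB A B (i+1) k := by
        simp [scanFwdB, h]
      rw [h1, h2, ih (i+1)]
      have : i + 1 + k = i + (k + 1) := by omega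
      rw [this]

-- recurrence of the backward scan
theorem gB_succ (A B : List Int) (k : Nat) :
    gB A B (k+1) =
      if PySem.List.slice B (some ((k : Nat) : Int)) (some (((k : Nat) : Int) + (A.length : Int))) = A
      then ((k : Nat) : Int) else gB A B k := by
  cases k with
  | zero => simp [gB, scanBwdB]
  | succ j =>
    show scanBwdB A B (j+1) = _
    simp only [scanBwdB, gB]
    push_cast
    ring_nf

-- A's fold over the first k candidates computes (forward-scan result, backward-scan result)
theorem foldA_eq (A B : List Int) (k : Nat) :
    (PySem.List.pyRange 0 (k : Int) 1).foldl
      (fun (st : Int × Int) i =>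
        if PySem.List.slice B (some i) (some (i + (A.length : Int))) = A then
          (if st.1 = -1 then i else st.1, i)
        else st)
      (-1, -1) = (scanFwdB A B 0 k, gB A B k) := by
  induction k with
  | zero =>
    rw [PySem.List.pyRange_one_eq_nil (by omega)]
    simp [scanFwdB, gB]
  | succ k ih =>
    have hc : ((k+1 : Nat) : Int) = (k : Int) + 1 := by push_cast; ring
    rw [hc, PySem.List.pyRange_one_succ_right (by omega), List.foldl_append, ih]
    simp only [List.foldl_cons, List.foldl_nil]
    rw [scanFwdB_succ, gB_succ]
    simp only [Nat.zero_add]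
    by_cases h : PySem.List.slice B (some ((k : Nat) : Int)) (some (((k : Nat) : Int) + (A.length : Int))) = A <;>
      by_cases h1 : scanFwdB A B 0 k = -1 <;> simp [h, h1]

-- ===== VERDICT (by name: the statement is the Claim_ definition above) =====
theorem find_sublist_indexes_spec : Claim_equal_find_sublist_indexes := by
  intro A B _
  unfold Spec_find_sublist_indexes find_sublist_indexes find_sublist_indexes_alt
  by_cases h0 : A = [] ∨ B = []
  · simp [h0]
  · simp only [h0, if_false]
    by_cases hlt : B.length < A.length
    · simp only [hlt, if_true]
      rw [PySem.List.pyRange_one_eq_nil (by omega)]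
      simp
    · simp only [hlt, if_false]
      have hk : ((B.length : Int) - (A.length : Int) + 1) = ((B.length - A.length + 1 : Nat) : Int) := by
        omega
      rw [hk, foldA_eq]
      rfl
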